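-- pv_equiv track=rewrite | github.com/adgodoyo/Data-Structures-and-Algorithms | 4 Algorithms on Strings/3W3_suffix_array_matching.py | _calcular_clase_equivalente
-- ===== SOURCE A (Python) =====
-- def _calcular_clase_equivalente(texto, orden):
--     clase_equivalente = [-1 for _ in range(len(texto))]
--     clase_actual = 0
--     char_previo = texto[orden[0]]
--
--     for o in orden:
--         char_actual = texto[o]
--         if char_actual != char_previo:
--             clase_actual += 1
--             char_previo = char_actual
--         clase_equivalente[o] = clase_actual
--
--     return clase_equivalente
-- ===== SOURCE B (Python) =====
-- def _calcular_clase_equivalente(texto, orden):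
--     # Phase 1: split `orden` into maximal runs of positions with equal characters.
--     runs = []
--     for o in orden:
--         c = texto[o]
--         if runs and runs[-1][0] == c:
--             runs[-1][1].append(o)
--         else:
--             runs.append((c, [o]))
--     # Phase 2: each run's index is its class number.
--     clase_equivalente = [-1] * len(texto)
--     for idx, (_, grp) in enumerate(runs):
--         for o in grp:
--             clase_equivalente[o] = idx
--     return clase_equivalente
-- ===== Notes on version B (the rewrite author's own statement) =====
-- stated objective: alternative
-- what changed: B splits orden into maximal runs of equal characters first and then assigns each run its enumeration index, instead of A's single pass with a previous-char sentinel and a running class counter.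
import Mathlib
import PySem

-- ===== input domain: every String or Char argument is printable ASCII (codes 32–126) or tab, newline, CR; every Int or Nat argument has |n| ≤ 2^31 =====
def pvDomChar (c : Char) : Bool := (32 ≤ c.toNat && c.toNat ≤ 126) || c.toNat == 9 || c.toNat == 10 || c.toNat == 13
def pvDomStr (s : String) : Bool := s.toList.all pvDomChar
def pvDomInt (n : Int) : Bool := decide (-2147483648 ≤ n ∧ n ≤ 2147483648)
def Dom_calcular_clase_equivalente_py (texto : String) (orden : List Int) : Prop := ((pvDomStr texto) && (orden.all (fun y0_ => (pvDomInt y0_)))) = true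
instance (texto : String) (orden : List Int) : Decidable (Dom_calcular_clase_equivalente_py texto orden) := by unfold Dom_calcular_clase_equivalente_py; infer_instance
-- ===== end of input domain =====

-- B replaces A's sentinel-and-counter sweep by a two-phase decomposition (group `orden`
-- into maximal runs of equal characters, then assign each run its index); same cost
-- (objective: alternative).  Pre_ excludes the inputs on which A raises IndexError
-- (empty `orden`, or an index outside Python range); B returns [-1]*len(texto) on empty `orden`.

-- ===== PORT A =====
-- loop body of A's `for o in orden`; `texto[o]` = Str.pyGet? (total via getD: Pre_ keeps indices in range)
def pvStepA (texto : String) (st : List Int × Int × Char) (o : Int) : List Int × Int × Char :=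
  let char_actual := (PySem.Str.pyGet? texto o).getD default
  if char_actual ≠ st.2.2 then
    (PySem.List.pySetD st.1 o (st.2.1 + 1), st.2.1 + 1, char_actual)
  else
    (PySem.List.pySetD st.1 o st.2.1, st.2.1, st.2.2)

def calcular_clase_equivalente_py (texto : String) (orden : List Int) : List Int :=
  let clase_equivalente := List.replicate texto.toList.length (-1 : Int)
  -- char_previo = texto[orden[0]] (raises on empty orden / bad index: outside Pre_)
  let char_previo := (PySem.Str.pyGet? texto (orden.headD 0)).getD default
  (orden.foldl (pvStepA texto) (clase_equivalente, (0 : Int), char_previo)).1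

-- ===== PORT B =====
-- phase 1 loop body: extend the run list by one position
def pvRunsStep (texto : String) (runs : List (Char × List Int)) (o : Int) : List (Char × List Int) :=
  let c := (PySem.Str.pyGet? texto o).getD default
  match runs.getLast? with
  | some last => if last.1 = c then runs.dropLast ++ [(last.1, last.2 ++ [o])]
                 else runs ++ [(c, [o])]
  | none => [(c, [o])]

-- phase 2: for idx, (_, grp) in enumerate(runs): for o in grp: ce[o] = idx
def pvAssign (ce : List Int) (runs : List (Char × List Int)) : List Int :=
  runs.zipIdx.foldl (fun ce p => p.1.2.foldl (fun ce o => PySem.List.pySetD ce o (p.2 : Int)) ce) ce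

def calcular_clase_equivalente_py_alt (texto : String) (orden : List Int) : List Int :=
  pvAssign (List.replicate texto.toList.length (-1 : Int)) (orden.foldl (pvRunsStep texto) [])

-- ===== PRECONDITION & SPEC =====
-- Pre_: exactly where Python A returns — orden nonempty and every index in Python range of texto
def Pre_calcular_clase_equivalente_py (texto : String) (orden : List Int) : Prop :=
  orden ≠ [] ∧ ∀ o ∈ orden, PySem.Raise.InRange texto.toList.length o
instance (texto : String) (orden : List Int) : Decidable (Pre_calcular_clase_equivalente_py texto orden) := by unfold Pre_calcular_clase_equivalente_py; infer_instance
def pvWitness_calcular_clase_equivalente_py : String × List Int := ("aba", [0, 2, 1])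

def Spec_calcular_clase_equivalente_py (texto : String) (orden : List Int) (out : List Int) : Prop := out = calcular_clase_equivalente_py_alt texto orden
instance (texto : String) (orden : List Int) (out : List Int) : Decidable (Spec_calcular_clase_equivalente_py texto orden out) := by unfold Spec_calcular_clase_equivalente_py; infer_instance

-- ===== CLAIM (what is proved, stated in full; the proofs are below) =====
def Claim_equal_calcular_clase_equivalente_py : Prop := ∀ (texto : String) (orden : List Int), Dom_calcular_clase_equivalente_py texto orden → Pre_calcular_clase_equivalente_py texto orden → Spec_calcular_clase_equivalente_py texto orden (calcular_clase_equivalente_py texto orden)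
-- ===== LEMMAS AND PROOFS =====

-- appending one run at the end = folding its group with class index rs.length
lemma pvAssign_append (ce : List Int) (rs : List (Char × List Int)) (c : Char) (g : List Int) :
    pvAssign ce (rs ++ [(c, g)])
      = g.foldl (fun ce o => PySem.List.pySetD ce o (rs.length : Int)) (pvAssign ce rs) := by
  simp [pvAssign, List.zipIdx_append]

lemma pvAssign_push (ce : List Int) (rs : List (Char × List Int)) (c : Char) (g : List Int) (o : Int) :
    pvAssign ce (rs ++ [(c, g ++ [o])])
      = PySem.List.pySetD (pvAssign ce (rs ++ [(c, g)])) o (rs.length : Int) := by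
  rw [pvAssign_append, pvAssign_append, List.foldl_append]
  simp

-- loop invariant: A's fold from (pvAssign ce (rs++[(c,g)]), |rs|, c) tracks B's run construction
lemma pv_inv (texto : String) : ∀ (l : List Int) (rs : List (Char × List Int)) (c : Char) (g : List Int) (ce : List Int),
    (l.foldl (pvStepA texto) (pvAssign ce (rs ++ [(c, g)]), (rs.length : Int), c)).1
      = pvAssign ce (l.foldl (pvRunsStep texto) (rs ++ [(c, g)])) := by
  intro l
  induction l with
  | nil => intro rs c g ce; simp
  | cons o l ih =>
    intro rs c g ce
    rw [List.foldl_cons, List.foldl_cons]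
    by_cases h : (PySem.List.pyGet? texto.toList o).getD 'A' = c
    · have hA : pvStepA texto (pvAssign ce (rs ++ [(c, g)]), (rs.length : Int), c) o
          = (pvAssign ce (rs ++ [(c, g ++ [o])]), (rs.length : Int), c) := by
        simp [pvStepA, h, pvAssign_push]
      have hB : pvRunsStep texto (rs ++ [(c, g)]) o = rs ++ [(c, g ++ [o])] := by
        simp [pvRunsStep, h]
      rw [hA, hB, ih]
    · have hA : pvStepA texto (pvAssign ce (rs ++ [(c, g)]), (rs.length : Int), c) o
          = (pvAssign ce ((rs ++ [(c, g)]) ++ [((PySem.Str.pyGet? texto o).getD default, [o])]),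
             ((rs ++ [(c, g)]).length : Int), (PySem.Str.pyGet? texto o).getD default) := by
        rw [pvAssign_append (g := [o])]
        simp [pvStepA, h]
      have hB : pvRunsStep texto (rs ++ [(c, g)]) o
          = (rs ++ [(c, g)]) ++ [((PySem.Str.pyGet? texto o).getD default, [o])] := by
        simp [pvRunsStep]
        intro hc; exact absurd hc.symm h
      rw [hA, hB, ih]

-- ===== VERDICT (by name: the statement is the Claim_ definition above) =====
theorem calcular_clase_equivalente_py_spec : Claim_equal_calcular_clase_equivalente_py := by
  intro texto orden _ hpre
  unfold Spec_calcular_clase_equivalente_py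
  obtain ⟨hne, -⟩ := hpre
  match orden, hne with
  | o0 :: rest, _ =>
    show (List.foldl (pvStepA texto)
        (List.replicate texto.toList.length (-1 : Int), (0 : Int),
         (PySem.Str.pyGet? texto ((o0 :: rest).headD 0)).getD default) (o0 :: rest)).1
      = pvAssign (List.replicate texto.toList.length (-1 : Int))
          (List.foldl (pvRunsStep texto) [] (o0 :: rest))
    rw [List.foldl_cons, List.foldl_cons]
    have h0 : pvStepA texto (List.replicate texto.toList.length (-1 : Int), (0 : Int),
        (PySem.Str.pyGet? texto ((o0 :: rest).headD 0)).getD default) o0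
        = (pvAssign (List.replicate texto.toList.length (-1 : Int))
            ([] ++ [((PySem.Str.pyGet? texto o0).getD default, [o0])]), ((List.length ([] : List (Char × List Int)) : Nat) : Int),
           (PySem.Str.pyGet? texto o0).getD default) := by
      simp [pvStepA, pvAssign]
    have h1 : pvRunsStep texto [] o0 = [] ++ [((PySem.Str.pyGet? texto o0).getD default, [o0])] := by
      simp [pvRunsStep]
    rw [h0, h1, pv_inv]
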